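-- pv_equiv track=rewrite | github.com/NiniAndy/Hpyformer | funasr/models/hypformer/model.py | remove_duplicates_and_blank
-- ===== SOURCE A (Python) =====
-- from typing import Union, Dict, List, Tuple, Optional
--
-- def remove_duplicates_and_blank(hyp: List[int],
--                                 blank_id: int = 0) -> List[int]:
--     new_hyp: List[int] = []
--     cur = 0
--     while cur < len(hyp):
--         if hyp[cur] != blank_id:
--             new_hyp.append(hyp[cur])
--         prev = cur
--         while cur < len(hyp) and hyp[cur] == hyp[prev]:
--             cur += 1
--     return new_hyp
-- ===== SOURCE B (Python) =====
-- def remove_duplicates_and_blank(hyp, blank_id=0):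
--     new_hyp = []
--     prev = object()  # sentinel distinct from every int
--     for x in hyp:
--         if x != prev:
--             if x != blank_id:
--                 new_hyp.append(x)
--             prev = x
--     return new_hyp
-- ===== Notes on version B (the rewrite author's own statement) =====
-- stated objective: idiomatic
-- what changed: Replaces the nested pointer-advancing while loops and repeated indexing with a single flat for-loop over the elements that tracks the previous element in a sentinel-initialized variable.
import Mathlib
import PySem

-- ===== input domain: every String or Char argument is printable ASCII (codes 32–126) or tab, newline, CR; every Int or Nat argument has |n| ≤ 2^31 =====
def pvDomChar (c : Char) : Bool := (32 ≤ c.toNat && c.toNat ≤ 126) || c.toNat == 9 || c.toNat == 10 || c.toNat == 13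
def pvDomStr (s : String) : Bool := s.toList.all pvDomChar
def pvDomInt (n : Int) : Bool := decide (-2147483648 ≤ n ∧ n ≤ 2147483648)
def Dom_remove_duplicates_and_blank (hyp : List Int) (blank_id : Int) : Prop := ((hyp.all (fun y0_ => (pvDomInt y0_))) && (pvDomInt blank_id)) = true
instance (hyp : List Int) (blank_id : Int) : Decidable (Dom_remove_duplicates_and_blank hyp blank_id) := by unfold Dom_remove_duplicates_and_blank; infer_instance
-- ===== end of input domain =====

-- B replaces the nested pointer-advancing while loops with one flat pass tracking the previous element (idiomatic; same cost).

-- ===== PORT A =====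
-- inner 'while cur < len(hyp) and hyp[cur] == hyp[prev]: cur += 1' (v = hyp[prev] is fixed during the loop)
def skipA (hyp : List Int) (v : Int) (cur : Nat) : Nat :=
  if _h : cur < hyp.length ∧ hyp[cur]! = v then skipA hyp v (cur + 1) else cur
termination_by hyp.length - cur

theorem skipA_ge (hyp : List Int) (v : Int) (cur : Nat) : cur ≤ skipA hyp v cur := by
  rw [skipA]
  split
  · exact Nat.le_trans (Nat.le_succ cur) (skipA_ge hyp v (cur + 1))
  · exact Nat.le_refl cur
termination_by hyp.length - cur
decreasing_by omega

theorem skipA_gt (hyp : List Int) (v : Int) (cur : Nat)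
    (h : cur < hyp.length) (hv : hyp[cur]! = v) : cur < skipA hyp v cur := by
  rw [skipA]
  rw [dif_pos ⟨h, hv⟩]
  exact Nat.lt_of_lt_of_le (Nat.lt_succ_self cur) (skipA_ge hyp v (cur + 1))

-- outer while loop of A, over the index cur, accumulating appended elements
def loopA (hyp : List Int) (blank_id : Int) (cur : Nat) : List Int :=
  if h : cur < hyp.length then
    (if hyp[cur] ≠ blank_id then [hyp[cur]] else []) ++
      loopA hyp blank_id (skipA hyp hyp[cur] cur)
  else []
termination_by hyp.length - cur
decreasing_by
  have := skipA_gt hyp hyp[cur] cur h (by simp [getElem!_pos, h])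
  omega

def remove_duplicates_and_blank (hyp : List Int) (blank_id : Int) : List Int :=
  loopA hyp blank_id 0

-- ===== PORT B =====
-- one step of B's for-loop: state = (new_hyp, prev); prev starts as a sentinel (none)
def stepB (blank_id : Int) (st : List Int × Option Int) (x : Int) : List Int × Option Int :=
  if some x ≠ st.2 then ((if x ≠ blank_id then st.1 ++ [x] else st.1), some x) else st

def remove_duplicates_and_blank_alt (hyp : List Int) (blank_id : Int) : List Int :=
  (hyp.foldl (stepB blank_id) ([], none)).1

-- ===== PRECONDITION & SPEC =====
def Spec_remove_duplicates_and_blank (hyp : List Int) (blank_id : Int) (out : List Int) : Prop := out = remove_duplicates_and_blank_alt hyp blank_id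
instance (hyp : List Int) (blank_id : Int) (out : List Int) : Decidable (Spec_remove_duplicates_and_blank hyp blank_id out) := by unfold Spec_remove_duplicates_and_blank; infer_instance

-- ===== CLAIM (what is proved, stated in full; the proofs are below) =====
def Claim_equal_remove_duplicates_and_blank : Prop := ∀ (hyp : List Int) (blank_id : Int), Dom_remove_duplicates_and_blank hyp blank_id → Spec_remove_duplicates_and_blank hyp blank_id (remove_duplicates_and_blank hyp blank_id)

-- ===== LEMMAS AND PROOFS =====

-- canonical run-collapsing function both ports are reduced to
def collapse (blank_id : Int) : List Int → List Int
  | [] => []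
  | x :: xs =>
    (if x ≠ blank_id then [x] else []) ++ collapse blank_id (xs.dropWhile (· == x))
termination_by l => l.length
decreasing_by
  have := List.length_dropWhile_le (· == x) xs
  simp only [List.length_cons]
  omega

theorem skipA_drop (hyp : List Int) (v : Int) (cur : Nat) :
    hyp.drop (skipA hyp v cur) = (hyp.drop cur).dropWhile (· == v) := by
  rw [skipA]
  split
  · rename_i h
    obtain ⟨hlt, hv⟩ := h
    rw [getElem!_pos hyp cur hlt] at hv
    rw [skipA_drop hyp v (cur + 1), List.drop_eq_getElem_cons hlt]
    simp [List.dropWhile, hv]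
  · rename_i h
    by_cases hlt : cur < hyp.length
    · have hv : ¬ hyp[cur]! = v := fun hv => h ⟨hlt, hv⟩
      rw [getElem!_pos hyp cur hlt] at hv
      rw [List.drop_eq_getElem_cons hlt]
      have hb : (hyp[cur] == v) = false := by simp [hv]
      simp [List.dropWhile, hb]
    · rw [List.drop_eq_nil_of_le (by omega)]
      simp
termination_by hyp.length - cur
decreasing_by omega

theorem loopA_eq_collapse (hyp : List Int) (blank_id : Int) (cur : Nat) :
    loopA hyp blank_id cur = collapse blank_id (hyp.drop cur) := by
  rw [loopA]
  split
  · rename_i h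
    rw [loopA_eq_collapse hyp blank_id (skipA hyp hyp[cur] cur),
        skipA_drop hyp hyp[cur] cur]
    rw [List.drop_eq_getElem_cons h, collapse]
    simp [List.dropWhile]
  · rename_i h
    rw [List.drop_eq_nil_of_le (by omega), collapse]
termination_by hyp.length - cur
decreasing_by
  have := skipA_gt hyp hyp[cur] cur ‹_› (by simp [getElem!_pos, ‹cur < hyp.length›])
  omega

-- B's loop as structural recursion on the list, prev tracked as a parameter
def gB (blank_id : Int) : Option Int → List Int → List Int
  | _, [] => []
  | prev, x :: xs =>
    if some x ≠ prev then (if x ≠ blank_id then [x] else []) ++ gB blank_id (some x) xs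
    else gB blank_id prev xs

theorem foldB_eq_gB (blank_id : Int) (xs : List Int) (acc : List Int) (prev : Option Int) :
    (xs.foldl (stepB blank_id) (acc, prev)).1 = acc ++ gB blank_id prev xs := by
  induction xs generalizing acc prev with
  | nil => simp [gB]
  | cons x xs ih =>
    simp only [List.foldl_cons, stepB, gB]
    by_cases hx : some x ≠ prev
    · rw [if_pos hx, if_pos hx]
      by_cases hb : x ≠ blank_id
      · rw [if_pos hb, if_pos hb]; rw [ih]; simp
      · rw [if_neg hb, if_neg hb, ih]; simp
    · rw [if_neg hx, if_neg hx]; exact ih acc prev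

theorem gB_some_eq_collapse (blank_id : Int) (xs : List Int) (v : Int) :
    gB blank_id (some v) xs = collapse blank_id (xs.dropWhile (· == v)) := by
  induction xs generalizing v with
  | nil => simp [gB, collapse]
  | cons x xs ih =>
    by_cases hv : x = v
    · subst hv
      simp only [gB, List.dropWhile]
      rw [if_neg (by simp)]
      simp [ih x]
    · simp only [gB, List.dropWhile]
      rw [if_pos (by simp [hv])]
      have : (x == v) = false := by simp [hv]
      rw [this]
      rw [collapse, ih x]

theorem gB_none_eq_collapse (blank_id : Int) (xs : List Int) :
    gB blank_id none xs = collapse blank_id xs := by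
  cases xs with
  | nil => simp [gB, collapse]
  | cons x xs =>
    simp only [gB]
    rw [if_pos (by simp), collapse, gB_some_eq_collapse]

-- ===== VERDICT (by name: the statement is the Claim_ definition above) =====
theorem remove_duplicates_and_blank_spec : Claim_equal_remove_duplicates_and_blank := by
  intro hyp blank_id _
  show remove_duplicates_and_blank hyp blank_id = remove_duplicates_and_blank_alt hyp blank_id
  rw [remove_duplicates_and_blank, remove_duplicates_and_blank_alt,
      loopA_eq_collapse, foldB_eq_gB, gB_none_eq_collapse]
  simp
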